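-- pv_equiv track=rewrite | github.com/ewernn/trait-interp | experiments/bullshit/scripts/prepare_liars_bench_dataset.py | extract_turns
-- ===== SOURCE A (Python) =====
-- def extract_turns(messages: list[dict]) -> dict:
--     """Extract system, user, and assistant content from message list."""
--     system, user, assistant = None, None, None
--     for msg in messages:
--         role = msg.get("role", "")
--         content = msg.get("content", "")
--         if role == "system":
--             system = content
--         elif role == "user":
--             user = content
--         elif role == "assistant":
--             assistant = content
--     if user is None:
--         raise ValueError(f"No user message found in: {messages}")
--     return {"system_prompt": system, "user_text": user, "assistant_response": assistant}
-- ===== SOURCE B (Python) =====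
-- def extract_turns(messages: list[dict]) -> dict:
--     """Extract system, user, and assistant content from message list."""
--     def last_content(role):
--         # scan back-to-front; first match from the end == last occurrence
--         for msg in reversed(messages):
--             if msg.get("role", "") == role:
--                 return msg.get("content", "")
--         return None
--
--     user = last_content("user")
--     if user is None:
--         raise ValueError(f"No user message found in: {messages}")
--     return {
--         "system_prompt": last_content("system"),
--         "user_text": user,
--         "assistant_response": last_content("assistant"),
--     }
-- ===== Notes on version B (the rewrite author's own statement) =====
-- stated objective: alternative
-- what changed: Replaces A's forward accumulator pass with three-way branching by three independent back-to-front searches with early exit (first match from the end = A's last overwrite).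
import Mathlib
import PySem

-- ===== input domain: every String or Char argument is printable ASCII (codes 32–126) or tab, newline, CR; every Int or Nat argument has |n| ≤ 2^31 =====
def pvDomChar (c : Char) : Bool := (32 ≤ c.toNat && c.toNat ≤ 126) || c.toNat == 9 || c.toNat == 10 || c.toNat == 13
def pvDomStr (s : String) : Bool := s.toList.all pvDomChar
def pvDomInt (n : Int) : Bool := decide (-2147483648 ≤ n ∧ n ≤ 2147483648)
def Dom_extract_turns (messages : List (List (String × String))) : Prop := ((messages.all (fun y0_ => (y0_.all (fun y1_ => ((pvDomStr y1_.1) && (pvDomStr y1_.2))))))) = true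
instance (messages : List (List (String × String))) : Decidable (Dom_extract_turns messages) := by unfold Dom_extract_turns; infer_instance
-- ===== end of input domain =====

-- B replaces A's forward accumulator pass (three-way role branching) by three independent
-- back-to-front searches with early exit (first match from the end = A's last overwrite); objective: alternative.


-- ===== PORT A =====
-- literal port of A: fold over messages keeping the (system, user, assistant) triple,
-- branching on role; Python's 'raise ValueError' when user is None is excluded by Pre_.
def extractStep (st : Option String × Option String × Option String)
    (msg : List (String × String)) : Option String × Option String × Option String :=
  let role := (PySem.Dict.ofList msg).getD "role" ""
  let content := (PySem.Dict.ofList msg).getD "content" ""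
  if role == "system" then (some content, st.2.1, st.2.2)
  else if role == "user" then (st.1, some content, st.2.2)
  else if role == "assistant" then (st.1, st.2.1, some content)
  else st

def extract_turns (messages : List (List (String × String))) : List (String × Option String) :=
  let st := messages.foldl extractStep (none, none, none)
  [("system_prompt", st.1), ("user_text", st.2.1), ("assistant_response", st.2.2)]

-- ===== PORT B =====
-- literal port of B's helper last_content: linear search over reversed(messages),
-- returning the first matching message's content (List.find? is that early-exit scan).
def lastContent (role : String) (messages : List (List (String × String))) : Option String :=
  (messages.reverse.find? (fun msg => (PySem.Dict.ofList msg).getD "role" "" == role)).map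
    (fun msg => (PySem.Dict.ofList msg).getD "content" "")

def extract_turns_alt (messages : List (List (String × String))) : List (String × Option String) :=
  [("system_prompt", lastContent "system" messages),
   ("user_text", lastContent "user" messages),
   ("assistant_response", lastContent "assistant" messages)]

-- ===== PRECONDITION & SPEC =====
-- Pre_ excludes exactly the inputs with no "user"-role message, where Python A raises ValueError (B raises too).
def Pre_extract_turns (messages : List (List (String × String))) : Prop :=
  (messages.any (fun m => (PySem.Dict.ofList m).getD "role" "" == "user")) = true
instance (messages : List (List (String × String))) : Decidable (Pre_extract_turns messages) := by unfold Pre_extract_turns; infer_instance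
def pvWitness_extract_turns : (List (List (String × String))) := [[("role", "user"), ("content", "hi")]]

def Spec_extract_turns (messages : List (List (String × String))) (out : List (String × Option String)) : Prop := out = extract_turns_alt messages
instance (messages : List (List (String × String))) (out : List (String × Option String)) : Decidable (Spec_extract_turns messages out) := by unfold Spec_extract_turns; infer_instance

-- ===== CLAIM (what is proved, stated in full; the proofs are below) =====
def Claim_equal_extract_turns : Prop := ∀ (messages : List (List (String × String))), Dom_extract_turns messages → Pre_extract_turns messages → Spec_extract_turns messages (extract_turns messages)

-- ===== LEMMAS AND PROOFS =====

-- one cons step of the backward search: last occurrence in m::rest is the one in rest if any, else m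
theorem lastContent_cons (role : String) (m : List (String × String))
    (rest : List (List (String × String))) :
    lastContent role (m :: rest) =
      (lastContent role rest).or
        (if (PySem.Dict.ofList m).getD "role" "" == role
         then some ((PySem.Dict.ofList m).getD "content" "") else none) := by
  simp only [lastContent, List.reverse_cons, List.find?_append]
  cases h : (rest.reverse.find? (fun msg => (PySem.Dict.ofList msg).getD "role" "" == role)) with
  | some v => simp
  | none =>
    simp only [Option.none_or, Option.map_none]
    by_cases hm : (PySem.Dict.ofList m).getD "role" "" == role <;> simp [List.find?, hm]

-- invariant: A's fold triple equals B's three backward searches, seeded by the initial triple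
theorem pv_inv (msgs : List (List (String × String))) (s u a : Option String) :
    msgs.foldl extractStep (s, u, a) =
      ((lastContent "system" msgs).or s,
       (lastContent "user" msgs).or u,
       (lastContent "assistant" msgs).or a) := by
  induction msgs generalizing s u a with
  | nil => simp [lastContent]
  | cons m rest ih =>
    simp only [List.foldl_cons, ih, lastContent_cons, Option.or_assoc]
    by_cases h1 : (PySem.Dict.ofList m).getD "role" "" = "system"
    · simp [extractStep, h1]
    · by_cases h2 : (PySem.Dict.ofList m).getD "role" "" = "user"
      · simp [extractStep, h2]
      · by_cases h3 : (PySem.Dict.ofList m).getD "role" "" = "assistant"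
        · simp [extractStep, h3]
        · simp [extractStep, h1, h2, h3]

-- ===== VERDICT (by name: the statement is the Claim_ definition above) =====
theorem extract_turns_spec : Claim_equal_extract_turns := by
  intro messages _ _
  show extract_turns messages = extract_turns_alt messages
  simp [extract_turns, extract_turns_alt, pv_inv]
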